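-- pv_equiv track=rewrite | github.com/liuaaron0226/patrick_webapp | patrick_method_solver.py | split_literals
-- ===== SOURCE A (Python) =====
-- def split_literals(expr):
--     i = 0
--     literals = []
--     while i < len(expr):
--         if i + 1 < len(expr) and expr[i+1] == "'":
--             literals.append(expr[i:i+2])
--             i += 2
--         else:
--             literals.append(expr[i])
--             i += 1
--     return literals
-- ===== SOURCE B (Python) =====
-- import re
--
-- def split_literals(expr):
--     # One regex scan: any character (incl. newline) optionally followed by a prime.
--     return re.findall(r"(?s).'?", expr)
-- ===== Notes on version B (the rewrite author's own statement) =====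
-- stated objective: idiomatic
-- what changed: Replaced the manual index/while loop with a single regex scan (re.findall with DOTALL: any character optionally followed by a prime).
import Mathlib
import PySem

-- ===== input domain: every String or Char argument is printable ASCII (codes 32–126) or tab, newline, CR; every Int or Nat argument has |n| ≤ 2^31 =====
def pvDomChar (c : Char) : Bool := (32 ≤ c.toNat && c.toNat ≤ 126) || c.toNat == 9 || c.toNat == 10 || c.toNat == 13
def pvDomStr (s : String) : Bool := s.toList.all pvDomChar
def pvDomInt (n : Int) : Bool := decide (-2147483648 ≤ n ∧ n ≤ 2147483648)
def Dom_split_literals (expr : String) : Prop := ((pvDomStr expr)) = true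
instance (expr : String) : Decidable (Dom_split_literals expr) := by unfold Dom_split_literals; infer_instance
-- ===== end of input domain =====

-- B replaces A's manual index loop by one regex scan (re.findall, DOTALL): idiomatic, same cost.

-- ===== PORT A =====
-- while loop over index i; expr[i+1] via pyGet?, expr[i:i+2] via slice, expr[i] via pyGet? (in range by the loop guard)
def splitLoopA (cs : List Char) (i : Nat) (acc : List String) : List String :=
  if h : i < cs.length then
    if PySem.List.pyGet? cs ((i : Int) + 1) = some '\'' then
      splitLoopA cs (i + 2) (acc ++ [String.ofList (PySem.List.slice cs (some (i : Int)) (some ((i : Int) + 2)))])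
    else
      splitLoopA cs (i + 1) (acc ++ [String.ofList (((PySem.List.pyGet? cs (i : Int)).getD ' ') :: [])])
  else acc
termination_by cs.length - i
decreasing_by all_goals omega

def split_literals (expr : String) : List String := splitLoopA expr.toList 0 []

-- ===== PORT B =====
-- the regex r"(?s).'?" scan: each match is one char, greedily extended by a following prime
def tokensB : List Char → List String
  | [] => []
  | c :: rest =>
    if rest.head? = some '\'' then String.ofList [c, '\''] :: tokensB rest.tail
    else String.ofList [c] :: tokensB rest
termination_by cs => cs.length
decreasing_by all_goals (simp [List.length_tail]; try omega)

def split_literals_alt (expr : String) : List String := tokensB expr.toList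

-- ===== PRECONDITION & SPEC =====
def Spec_split_literals (expr : String) (out : List String) : Prop := out = split_literals_alt expr
instance (expr : String) (out : List String) : Decidable (Spec_split_literals expr out) := by unfold Spec_split_literals; infer_instance

-- ===== CLAIM (what is proved, stated in full; the proofs are below) =====
def Claim_equal_split_literals : Prop := ∀ (expr : String), Dom_split_literals expr → Spec_split_literals expr (split_literals expr)

-- ===== LEMMAS AND PROOFS =====
theorem splitLoopA_eq (cs : List Char) (i : Nat) (acc : List String) :
    splitLoopA cs i acc = acc ++ tokensB (cs.drop i) := by
  fun_induction splitLoopA cs i acc with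
  | case1 i acc h hq ih =>
    have h2 : cs[i+1]? = some '\'' := by
      rw [← PySem.List.pyGet?_natCast, show ((i + 1 : Nat) : Int) = (i : Int) + 1 by push_cast; ring]
      exact hq
    obtain ⟨hlt2, hv⟩ := List.getElem?_eq_some_iff.mp h2
    have hd1 : cs.drop i = cs[i] :: cs.drop (i + 1) := List.drop_eq_getElem_cons h
    have hd2 : cs.drop (i + 1) = cs[i+1] :: cs.drop (i + 2) := List.drop_eq_getElem_cons hlt2
    have hslice : PySem.List.slice cs (some (i : Int)) (some ((i : Int) + 2)) = [cs[i], cs[i+1]] := by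
      rw [show ((i : Int) + 2) = ((i + 2 : Nat) : Int) by push_cast; ring,
        PySem.List.slice_natCast, show i + 2 - i = 2 by omega, hd1, hd2]
      rfl
    rw [ih, hslice, hd1, hd2, hv]
    simp [tokensB]
  | case2 i acc h hq ih =>
    have h2 : cs[i+1]? ≠ some '\'' := by
      rw [← PySem.List.pyGet?_natCast, show ((i + 1 : Nat) : Int) = (i : Int) + 1 by push_cast; ring]
      exact hq
    have hd1 : cs.drop i = cs[i] :: cs.drop (i + 1) := List.drop_eq_getElem_cons h
    have hget : PySem.List.pyGet? cs (i : Int) = some cs[i] := by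
      rw [PySem.List.pyGet?_natCast]
      exact List.getElem?_eq_getElem h
    rw [ih, hget, hd1]
    have hhead : (cs.drop (i + 1)).head? = cs[i+1]? := List.head?_drop
    rcases hdrop : cs.drop (i + 1) with _ | ⟨c, rest⟩
    · simp [tokensB]
    · have hc : c ≠ '\'' := by
        rw [hdrop] at hhead
        intro hcc
        exact h2 (by rw [← hhead, hcc]; rfl)
      simp [tokensB, hc]
  | case3 i acc h =>
    rw [List.drop_eq_nil_of_le (by omega)]
    simp [tokensB]

-- ===== VERDICT (by name: the statement is the Claim_ definition above) =====
theorem split_literals_spec : Claim_equal_split_literals := by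
  intro expr _
  unfold Spec_split_literals split_literals split_literals_alt
  simpa using splitLoopA_eq expr.toList 0 []
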